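-- pv_equiv track=rewrite | github.com/richjais/Python-prep-content | Array/loadBalancer.py | balanceLoad
-- ===== SOURCE A (Python) =====
-- def balanceLoad(A):
--     N = len(A)
--     if N < 5 or N > 10 ** 5:  # check length, boundary check
--         return False  # return false length of array not in range
--
--     # check elements are in range, boundary check
--     for x in A:
--         if x < 1 or x > 10 ** 3:
--             return False
--
--     s = set(A)  # to check if all elements are same
--     if len(s) == 1:
--         return False
--
--     start = 1  # drop element index from begin
--     end = N - 2  # drop element index from end
--
--     # if start equals end then balancing not possible
--     while start < end:  # loop till "start not equals end" to check load balancing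
--
--         # load of 3 workers is equal load balancing possible
--         if sum(A[:start]) == sum(A[start + 1:end - 1]) == sum(A[end:]):
--             return True
--
--         # all workers load not same:
--         # 1st worker load less or equal than 3rd worker increase load
--         if sum(A[:start]) <= sum(A[end + 1:]):
--             start += 1
--         else:  # 3rd worker load is less increase load for last worker
--             end -= 1
--     return False  # load balancing not possible
-- ===== SOURCE B (Python) =====
-- def balanceLoad(A):
--     N = len(A)
--     if N < 5 or N > 10 ** 5:
--         return False
--     for x in A:
--         if x < 1 or x > 10 ** 3:
--             return False
--     if len(set(A)) == 1:
--         return False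
--     # prefix sums: P[k] == sum(A[:k]); each slice sum below becomes a subtraction of two lookups
--     P = [0]
--     t = 0
--     for x in A:
--         t += x
--         P.append(t)
--     start = 1
--     end = N - 2
--     while start < end:
--         left = P[start]
--         mid = P[end - 1] - P[start + 1] if start + 1 <= end - 1 else 0
--         tail = P[N] - P[end]
--         if left == mid and mid == tail:
--             return True
--         if left <= P[N] - P[end + 1]:
--             start += 1
--         else:
--             end -= 1
--     return False
-- ===== Notes on version B (the rewrite author's own statement) =====
-- stated objective: alternative
-- what changed: A prefix-sum array built in one pass replaces every sum() over a slice in the two-pointer loop with a constant-time subtraction of two prefix lookups (a timing run's large inputs are rejected by the guards before the loop, so no speed-up is measured there).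
import Mathlib
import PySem

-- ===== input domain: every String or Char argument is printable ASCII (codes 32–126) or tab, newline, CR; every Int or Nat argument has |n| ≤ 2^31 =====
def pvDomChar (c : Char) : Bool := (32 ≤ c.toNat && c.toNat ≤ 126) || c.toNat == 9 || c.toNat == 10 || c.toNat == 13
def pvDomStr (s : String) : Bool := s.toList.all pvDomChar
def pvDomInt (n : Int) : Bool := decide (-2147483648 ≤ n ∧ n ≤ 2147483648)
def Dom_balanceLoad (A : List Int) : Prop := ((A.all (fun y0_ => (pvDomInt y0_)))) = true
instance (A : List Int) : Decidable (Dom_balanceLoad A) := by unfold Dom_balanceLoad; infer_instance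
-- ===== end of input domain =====

-- B replaces A's repeated sum()-of-slice scans in the two-pointer loop by one prefix-sum
-- array, so each loop step does constant-size subtractions instead of re-summing slices.

-- ===== PORT A =====
-- A's while loop: each iteration re-sums four slices; terminates since end-start decreases.
def balanceLoadLoopA (A : List Int) (start e : Int) : Bool :=
  if _h : start < e then
    if (PySem.List.slice A none (some start)).sum == (PySem.List.slice A (some (start + 1)) (some (e - 1))).sum
        && (PySem.List.slice A (some (start + 1)) (some (e - 1))).sum == (PySem.List.slice A (some e) none).sum then
      true
    else if (PySem.List.slice A none (some start)).sum ≤ (PySem.List.slice A (some (e + 1)) none).sum then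
      balanceLoadLoopA A (start + 1) e
    else
      balanceLoadLoopA A start (e - 1)
  else
    false
termination_by (e - start).toNat
decreasing_by all_goals omega

def balanceLoad (A : List Int) : Bool :=
  let N : Int := PySem.List.len A
  if N < 5 || N > 10 ^ 5 then false
  else if A.any (fun x => x < 1 || x > 10 ^ 3) then false   -- the for-loop's early 'return False'
  else if PySem.Set.len (PySem.Set.ofList A) == 1 then false
  else balanceLoadLoopA A 1 (N - 2)

-- ===== PORT B =====
-- B's while loop over the prefix array P (P[k] = sum of first k elements).
def balanceLoadLoopB (P : List Int) (N start e : Int) : Bool :=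
  if _h : start < e then
    let left := PySem.List.pyGetD P start 0
    let mid := if start + 1 ≤ e - 1 then
        PySem.List.pyGetD P (e - 1) 0 - PySem.List.pyGetD P (start + 1) 0 else 0
    let tail := PySem.List.pyGetD P N 0 - PySem.List.pyGetD P e 0
    if left == mid && mid == tail then true
    else if left ≤ PySem.List.pyGetD P N 0 - PySem.List.pyGetD P (e + 1) 0 then
      balanceLoadLoopB P N (start + 1) e
    else
      balanceLoadLoopB P N start (e - 1)
  else
    false
termination_by (e - start).toNat
decreasing_by all_goals omega

def balanceLoad_alt (A : List Int) : Bool :=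
  let N : Int := PySem.List.len A
  if N < 5 || N > 10 ^ 5 then false
  else if A.any (fun x => x < 1 || x > 10 ^ 3) then false
  else if PySem.Set.len (PySem.Set.ofList A) == 1 then false
  else
    -- P = [0]; t = 0; for x in A: t += x; P.append(t)
    let tp := A.foldl (fun (tp : Int × List Int) x => (tp.1 + x, tp.2 ++ [tp.1 + x])) (0, [0])
    balanceLoadLoopB tp.2 N 1 (N - 2)

-- ===== PRECONDITION & SPEC =====
def Spec_balanceLoad (A : List Int) (out : Bool) : Prop := out = balanceLoad_alt A
instance (A : List Int) (out : Bool) : Decidable (Spec_balanceLoad A out) := by unfold Spec_balanceLoad; infer_instance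

-- ===== CLAIM (what is proved, stated in full; the proofs are below) =====
def Claim_equal_balanceLoad : Prop := ∀ (A : List Int), Dom_balanceLoad A → Spec_balanceLoad A (balanceLoad A)

-- ===== LEMMAS AND PROOFS =====

-- the prefix-building foldl, characterized
lemma pv_fold_pref (xs : List Int) : ∀ (t : Int) (acc : List Int),
    (xs.foldl (fun (tp : Int × List Int) x => (tp.1 + x, tp.2 ++ [tp.1 + x])) (t, acc)).2
      = acc ++ (List.range xs.length).map (fun i => t + ((xs.take (i + 1)).sum)) := by
  induction xs with
  | nil => simp
  | cons x xs ih =>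
      intro t acc
      rw [List.foldl_cons, ih (t + x) (acc ++ [t + x])]
      simp [List.range_succ_eq_map, List.append_assoc, Function.comp_def, add_assoc]

-- P[k] = sum(A[:k]) for 0 ≤ k ≤ len A
lemma pv_pref_get (A : List Int) (k : Int) (hk : 0 ≤ k) (hk2 : k ≤ (A.length : Int)) :
    PySem.List.pyGetD
      ((A.foldl (fun (tp : Int × List Int) x => (tp.1 + x, tp.2 ++ [tp.1 + x])) (0, [0])).2) k 0
      = (A.take k.toNat).sum := by
  rw [pv_fold_pref A 0 [0]]
  have hcast : k = ((k.toNat : Nat) : Int) := by omega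
  rw [hcast, PySem.List.pyGetD_natCast]
  rcases Nat.eq_zero_or_pos k.toNat with h0 | hpos
  · simp [h0]
  · have hlt : k.toNat - 1 < A.length := by omega
    have : k.toNat = (k.toNat - 1) + 1 := by omega
    rw [this]
    simp only [List.singleton_append, List.getD, List.getElem?_cons_succ]
    rw [List.getElem?_map, List.getElem?_range hlt]
    simp

-- sum of a drop/take window equals a difference of prefix sums
lemma pv_sum_window (A : List Int) (a b : Nat) (hab : a ≤ b) :
    ((A.drop a).take (b - a)).sum = (A.take b).sum - (A.take a).sum := by
  have hb : a + (b - a) = b := by omega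
  have : A.take b = A.take a ++ (A.drop a).take (b - a) := by
    rw [← hb, List.take_add]
    congr 2
    omega
  rw [this, List.sum_append]; ring

-- sum of a drop equals total minus prefix
lemma pv_sum_drop (A : List Int) (a : Nat) :
    (A.drop a).sum = A.sum - (A.take a).sum := by
  have := List.take_append_drop a A
  have hs : (A.take a).sum + (A.drop a).sum = A.sum := by
    rw [← List.sum_append, this]
  omega

-- the two loops agree for in-range pointers
lemma pv_loop_eq (A : List Int) (s e : Int) (hs : 1 ≤ s) (he : e ≤ (A.length : Int) - 2) :
    balanceLoadLoopA A s e
      = balanceLoadLoopB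
          ((A.foldl (fun (tp : Int × List Int) x => (tp.1 + x, tp.2 ++ [tp.1 + x])) (0, [0])).2)
          (PySem.List.len A) s e := by
  by_cases h : s < e
  · have hN : (PySem.List.len A) = (A.length : Int) := by simp [PySem.List.len_eq]
    have h1 : PySem.List.pyGetD ((A.foldl (fun (tp : Int × List Int) x => (tp.1 + x, tp.2 ++ [tp.1 + x])) (0, [0])).2) s 0
        = (A.take s.toNat).sum := pv_pref_get A s (by omega) (by omega)
    have hsl : (PySem.List.slice A none (some s)).sum = (A.take s.toNat).sum := by
      rw [PySem.List.slice_to A (by omega)]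
    have hmid : (PySem.List.slice A (some (s + 1)) (some (e - 1))).sum
        = (if s + 1 ≤ e - 1 then
            PySem.List.pyGetD ((A.foldl (fun (tp : Int × List Int) x => (tp.1 + x, tp.2 ++ [tp.1 + x])) (0, [0])).2) (e - 1) 0
            - PySem.List.pyGetD ((A.foldl (fun (tp : Int × List Int) x => (tp.1 + x, tp.2 ++ [tp.1 + x])) (0, [0])).2) (s + 1) 0
          else 0) := by
      rw [PySem.List.slice_toNat A (by omega) (by omega)]
      rw [pv_pref_get A (e - 1) (by omega) (by omega), pv_pref_get A (s + 1) (by omega) (by omega)]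
      split_ifs with hc
      · rw [pv_sum_window A (s + 1).toNat (e - 1).toNat (by omega)]
      · have h0 : (e - 1).toNat - (s + 1).toNat = 0 := by omega
        rw [h0]
        simp
    have htot : PySem.List.pyGetD ((A.foldl (fun (tp : Int × List Int) x => (tp.1 + x, tp.2 ++ [tp.1 + x])) (0, [0])).2) (PySem.List.len A) 0 = A.sum := by
      rw [hN, pv_pref_get A _ (by omega) (by omega)]
      simp
    have htail : (PySem.List.slice A (some e) none).sum
        = A.sum - PySem.List.pyGetD ((A.foldl (fun (tp : Int × List Int) x => (tp.1 + x, tp.2 ++ [tp.1 + x])) (0, [0])).2) e 0 := by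
      rw [PySem.List.slice_from A (by omega), pv_sum_drop, pv_pref_get A e (by omega) (by omega)]
    have htail1 : (PySem.List.slice A (some (e + 1)) none).sum
        = A.sum - PySem.List.pyGetD ((A.foldl (fun (tp : Int × List Int) x => (tp.1 + x, tp.2 ++ [tp.1 + x])) (0, [0])).2) (e + 1) 0 := by
      rw [PySem.List.slice_from A (by omega), pv_sum_drop, pv_pref_get A (e + 1) (by omega) (by omega)]
    rw [balanceLoadLoopA, balanceLoadLoopB]
    simp only [dif_pos h]
    rw [h1, hsl, hmid, htot, htail, htail1]
    have ih1 := pv_loop_eq A (s + 1) e (by omega) he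
    have ih2 := pv_loop_eq A s (e - 1) hs (by omega)
    split_ifs <;> simp_all
  · rw [balanceLoadLoopA, balanceLoadLoopB]
    simp [h]
termination_by (e - s).toNat
decreasing_by all_goals omega

-- ===== VERDICT (by name: the statement is the Claim_ definition above) =====
theorem balanceLoad_spec : Claim_equal_balanceLoad := by
  intro A _
  unfold Spec_balanceLoad
  simp only [balanceLoad, balanceLoad_alt]
  split_ifs with h1 h2 h3
  · rfl
  · rfl
  · rfl
  · have hN : PySem.List.len A = (A.length : Int) := by simp [PySem.List.len_eq]
    have hlen : 5 ≤ (A.length : Int) := by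
      simp only [Bool.or_eq_true, decide_eq_true_eq, not_or, not_lt, hN] at h1
      omega
    rw [hN]
    exact pv_loop_eq A 1 ((A.length : Int) - 2) (by omega) (by omega)
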